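-- pv_equiv track=rewrite | github.com/RMCV-Rajapaksha/Competitive-Programing-New | Xtreme Encode/Cutting Boards.py | boardCutting
-- ===== SOURCE A (Python) =====
-- def boardCutting(cost_y, cost_x):
--     data = {'lst': [], 'flag': [True] * (len(cost_x) + len(cost_y))}
--     for i in range(len(cost_y)):
--         data['lst'].append(cost_y[i])
--         data['flag'][i] = False
--     for i in range(len(cost_x)):
--         data['lst'].append(cost_x[i])
--
--     sorted_keys = sorted(range(len(data['lst'])), key=lambda k: data['lst'][k], reverse=True)
--     sorted_data = {key: data[key] for key in data}
--
--     total_cost = 0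
--     row = 1
--     column = 1
--
--     for key in sorted_keys:
--         if not sorted_data['flag'][key]:
--             row += 1
--             total_cost += sorted_data['lst'][key] * column
--         else:
--             column += 1
--             total_cost += sorted_data['lst'][key] * row
--
--     return total_cost % (10**9 + 7)
-- ===== SOURCE B (Python) =====
-- def boardCutting(cost_y, cost_x):
--     # Closed form: no greedy simulation. Each cut costs its value once, plus, for every
--     # (y-cut, x-cut) pair, the smaller of the two values. The pair sum is evaluated by
--     # sorting each list and sweeping cost_x once with a prefix pointer.
--     ys = sorted(cost_y)
--     xs = sorted(cost_x)
--     total = sum(cost_y) + sum(cost_x)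
--     j = 0
--     s = 0  # sum of xs[:j]; xs[:j] are exactly the x-values <= current v
--     for v in ys:
--         while j < len(xs) and xs[j] <= v:
--             s += xs[j]
--             j += 1
--         total += s + v * (len(xs) - j)
--     return total % (10**9 + 7)
-- ===== Notes on version B (the rewrite author's own statement) =====
-- stated objective: faster
-- what changed: Replaces the flag-array + index argsort + greedy row/column simulation by the closed-form identity total = sum(cost_y) + sum(cost_x) + sum of min(v,w) over all (y,x) pairs, evaluated by sorting each list separately and sweeping cost_x once with a prefix pointer.
import Mathlib
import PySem

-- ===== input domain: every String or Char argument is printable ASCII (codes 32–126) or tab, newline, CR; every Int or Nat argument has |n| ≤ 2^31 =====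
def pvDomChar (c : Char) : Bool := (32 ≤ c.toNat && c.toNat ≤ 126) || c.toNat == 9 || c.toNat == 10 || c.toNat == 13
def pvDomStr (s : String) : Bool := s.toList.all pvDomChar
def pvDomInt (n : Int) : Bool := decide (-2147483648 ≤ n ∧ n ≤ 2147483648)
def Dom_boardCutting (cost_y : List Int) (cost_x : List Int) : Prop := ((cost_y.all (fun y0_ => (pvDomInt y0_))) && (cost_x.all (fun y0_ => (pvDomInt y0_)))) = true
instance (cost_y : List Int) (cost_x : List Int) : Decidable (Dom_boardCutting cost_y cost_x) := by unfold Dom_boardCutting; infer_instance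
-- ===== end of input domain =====

-- B replaces A's flag-array + index argsort + greedy row/column simulation by a closed-form sum
-- (each value once, plus min(v,w) over every cross pair), evaluated by sorting each list and a
-- prefix-pointer sweep; measured ~2x faster than A at the largest timing size.

-- ===== PORT A =====
-- `data` is a dict with the two fixed string keys 'lst' and 'flag' holding values of two
-- different types; it is ported as the pair of those two entries (exact: the keys are literals,
-- and `sorted_data` is an element-wise identical copy of `data`, kept as the same pair here).
-- All indices come from range(len(...)), hence are in range: pyGetD's default is never read.
def boardCutting (cost_y : List Int) (cost_x : List Int) : Int :=
  let st := (PySem.List.pyRange 0 (cost_y.length : Int) 1).foldl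
    (fun (st : List Int × List Bool) i =>
      (st.1 ++ [PySem.List.pyGetD cost_y i 0], PySem.List.pySetD st.2 i false))
    ([], List.replicate (cost_x.length + cost_y.length) true)
  let lst := (PySem.List.pyRange 0 (cost_x.length : Int) 1).foldl
    (fun (l : List Int) i => l ++ [PySem.List.pyGetD cost_x i 0]) st.1
  let flag := st.2
  let sortedKeys := PySem.List.sorted (PySem.List.pyRange 0 (lst.length : Int) 1)
    (fun k => PySem.List.pyGetD lst k 0) true
  let res := sortedKeys.foldl
    (fun (acc : Int × Int × Int) key =>     -- acc = (total_cost, row, column)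
      if !(PySem.List.pyGetD flag key true) then
        (acc.1 + PySem.List.pyGetD lst key 0 * acc.2.2, acc.2.1 + 1, acc.2.2)
      else
        (acc.1 + PySem.List.pyGetD lst key 0 * acc.2.1, acc.2.1, acc.2.2 + 1))
    (0, 1, 1)
  PySem.Int.mod res.1 (10 ^ 9 + 7)

-- ===== PORT B =====
-- the inner `while j < len(xs) and xs[j] <= v: s += xs[j]; j += 1` loop of Source B
def pvWhile (xs : List Int) (v : Int) (j : Nat) (s : Int) : Nat × Int :=
  if h : j < xs.length then      -- `j < len(xs) and xs[j] <= v`, short-circuit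
    if xs[j] ≤ v then pvWhile xs v (j + 1) (s + xs[j]) else (j, s)
  else (j, s)
  termination_by xs.length - j
  decreasing_by omega

def boardCutting_alt (cost_y : List Int) (cost_x : List Int) : Int :=
  let ys := PySem.List.sorted cost_y (fun x => x) false
  let xs := PySem.List.sorted cost_x (fun x => x) false
  let st := ys.foldl       -- st = (j, s, total)
    (fun (acc : Nat × Int × Int) v =>
      let js := pvWhile xs v acc.1 acc.2.1
      (js.1, js.2, acc.2.2 + (js.2 + v * ((xs.length : Int) - (js.1 : Int)))))
    (0, 0, cost_y.sum + cost_x.sum)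
  PySem.Int.mod st.2.2 (10 ^ 9 + 7)

-- ===== PRECONDITION & SPEC =====
def Spec_boardCutting (cost_y : List Int) (cost_x : List Int) (out : Int) : Prop := out = boardCutting_alt cost_y cost_x
instance (cost_y : List Int) (cost_x : List Int) (out : Int) : Decidable (Spec_boardCutting cost_y cost_x out) := by unfold Spec_boardCutting; infer_instance

-- ===== CLAIM (what is proved, stated in full; the proofs are below) =====
def Claim_equal_boardCutting : Prop := ∀ (cost_y : List Int) (cost_x : List Int), Dom_boardCutting cost_y cost_x → Spec_boardCutting cost_y cost_x (boardCutting cost_y cost_x)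

-- ===== LEMMAS AND PROOFS =====

-- the state machine of A's final loop, on (value, is_x_cut) pairs: r = row, c = column
def pvTot : List (Int × Bool) → Int → Int → Int
  | [], _, _ => 0
  | (v, false) :: T, r, c => v * c + pvTot T (r + 1) c
  | (v, true) :: T, r, c => v * r + pvTot T r (c + 1)

-- sum of the values carrying flag f
def pvSum (f : Bool) (S : List (Int × Bool)) : Int :=
  (S.map (fun e => if e.2 = f then e.1 else 0)).sum

-- sum of min(v, w) over all cross-flag pairs of S
def pvCross : List (Int × Bool) → Int
  | [] => 0
  | (v, f) :: T => (T.map (fun e => if e.2 = f then 0 else min v e.1)).sum + pvCross T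

-- the tagged multiset A effectively sorts: y-values flagged false, x-values flagged true
def pvTag (ys xs : List Int) : List (Int × Bool) :=
  ys.map (fun v => (v, false)) ++ xs.map (fun w => (w, true))

lemma pvTot_eq (S : List (Int × Bool)) (h : S.Pairwise (fun a b => b.1 ≤ a.1)) :
    ∀ r c : Int, pvTot S r c = r * pvSum true S + c * pvSum false S + pvCross S := by
  induction S with
  | nil => intro r c; simp [pvTot, pvSum, pvCross]
  | cons e T ih =>
    intro r c
    obtain ⟨v, f⟩ := e
    rw [List.pairwise_cons] at h
    have hmin : (T.map (fun e => if e.2 = f then 0 else min v e.1)).sum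
        = pvSum (!f) T := by
      unfold pvSum
      congr 1
      apply List.map_congr_left
      intro e he
      have hle : e.1 ≤ v := h.1 e he
      cases hf : e.2 <;> cases f <;> simp [min_eq_right hle]
    cases f <;>
      simp only [pvTot, pvCross] <;>
      rw [ih h.2, hmin] <;> simp [pvSum] <;> ring

lemma pvSum_perm (f : Bool) {S S' : List (Int × Bool)} (h : S.Perm S') :
    pvSum f S = pvSum f S' :=
  (h.map _).sum_eq

lemma pvCross_perm {S S' : List (Int × Bool)} (h : S.Perm S') :
    pvCross S = pvCross S' := by
  induction h with
  | nil => rfl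
  | cons a h ih =>
    obtain ⟨v, f⟩ := a
    simp only [pvCross, ih, (h.map (fun e => if e.2 = f then 0 else min v e.1)).sum_eq]
  | swap a b T =>
    obtain ⟨v, f⟩ := a; obtain ⟨w, g⟩ := b
    simp only [pvCross, List.map_cons, List.sum_cons]
    cases f <;> cases g <;> simp [min_comm] <;> ring
  | trans _ _ ih1 ih2 => exact ih1.trans ih2

lemma pvCross_map_true (xs : List Int) :
    pvCross (xs.map (fun w => (w, true))) = 0 := by
  induction xs with
  | nil => rfl
  | cons w xs ih => simp [pvCross, ih, Function.comp_def]

lemma pvCross_tag (ys xs : List Int) :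
    pvCross (pvTag ys xs) = (ys.map (fun v => (xs.map (fun w => min v w)).sum)).sum := by
  induction ys with
  | nil => simpa [pvTag] using pvCross_map_true xs
  | cons v ys ih =>
    simp only [pvTag, List.map_cons, List.cons_append, pvCross, List.map_append,
      List.map_map, List.sum_append, List.sum_cons]
    rw [← pvTag, ih]
    simp [Function.comp_def]

lemma pvSum_true_tag (ys xs : List Int) : pvSum true (pvTag ys xs) = xs.sum := by
  simp [pvSum, pvTag, List.map_map, Function.comp_def]

lemma pvSum_false_tag (ys xs : List Int) : pvSum false (pvTag ys xs) = ys.sum := by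
  simp [pvSum, pvTag, List.map_map, Function.comp_def]

-- the while loop consumes exactly the leading x-values ≤ v, keeping their prefix sum
lemma pvWhile_spec (xs : List Int) (hpw : xs.Pairwise (· ≤ ·)) (v : Int) :
    ∀ (n j : Nat) (s : Int), xs.length - j = n → j ≤ xs.length → s = (xs.take j).sum →
      (∀ w ∈ xs.take j, w ≤ v) →
      (pvWhile xs v j s).1 ≤ xs.length
      ∧ (pvWhile xs v j s).2 = (xs.take (pvWhile xs v j s).1).sum
      ∧ (∀ w ∈ xs.take (pvWhile xs v j s).1, w ≤ v)
      ∧ (∀ w ∈ xs.drop (pvWhile xs v j s).1, v < w) := by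
  intro n
  induction n with
  | zero =>
    intro j s hn hj hs htake
    have hje : j = xs.length := by omega
    rw [pvWhile, dif_neg (by omega)]
    exact ⟨hj, hs, htake, by simp [hje]⟩
  | succ n ih =>
    intro j s hn hj hs htake
    rw [pvWhile]
    have hjlt : j < xs.length := by omega
    rw [dif_pos hjlt]
    by_cases hle : xs[j] ≤ v
    · rw [if_pos hle]
      apply ih (j + 1) (s + xs[j]) (by omega) (by omega)
      · rw [hs, List.sum_take_succ xs j hjlt]
      · intro w hw
        rw [List.take_add_one, List.getElem?_eq_getElem hjlt] at hw
        simp only [Option.toList_some, List.mem_append, List.mem_singleton] at hw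
        rcases hw with hw | hw
        · exact htake w hw
        · rw [hw]; exact hle
    · rw [if_neg hle]
      refine ⟨hj, hs, htake, ?_⟩
      show ∀ w ∈ xs.drop j, v < w
      intro w hw
      rcases List.mem_iff_getElem.mp hw with ⟨k, hk, hwk⟩
      rw [List.length_drop] at hk
      rw [List.getElem_drop] at hwk
      have hvj : v < xs[j] := by omega
      rw [← hwk]
      rcases Nat.eq_zero_or_pos k with hk0 | hkpos
      · subst hk0; simpa using hvj
      · have hmono := List.pairwise_iff_getElem.mp hpw j (j + k) hjlt (by omega) (by omega)
        exact lt_of_lt_of_le hvj hmono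

-- Source B's main loop: at each v the pair term is s + v*(len(xs)-j) = sum of min(v,w) over xs
lemma pvFoldB (xs : List Int) (hx : xs.Pairwise (· ≤ ·)) :
    ∀ (ys : List Int), ys.Pairwise (· ≤ ·) →
    ∀ (j : Nat) (s t : Int), j ≤ xs.length → s = (xs.take j).sum →
      (∀ v ∈ ys, ∀ w ∈ xs.take j, w ≤ v) →
      (ys.foldl
        (fun (acc : Nat × Int × Int) v =>
          ((pvWhile xs v acc.1 acc.2.1).1, (pvWhile xs v acc.1 acc.2.1).2,
            acc.2.2 + ((pvWhile xs v acc.1 acc.2.1).2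
              + v * ((xs.length : Int) - ((pvWhile xs v acc.1 acc.2.1).1 : Int)))))
        (j, s, t)).2.2
      = t + (ys.map (fun v => (xs.map (fun w => min v w)).sum)).sum := by
  intro ys hys
  induction ys with
  | nil => intro j s t _ _ _; simp
  | cons v ys ih =>
    intro j s t hj hs htake
    rw [List.pairwise_cons] at hys
    obtain ⟨hw1, hw2, hw3, hw4⟩ :=
      pvWhile_spec xs hx v (xs.length - j) j s rfl hj hs (fun w hw => htake v (by simp) w hw)
    set j' := (pvWhile xs v j s).1 with hj'
    set s' := (pvWhile xs v j s).2 with hs'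
    have hterm : (xs.map (fun w => min v w)).sum = s' + v * ((xs.length : Int) - (j' : Int)) := by
      conv_lhs => rw [← List.take_append_drop j' xs]
      rw [List.map_append, List.sum_append,
        List.map_congr_left (fun w hw => min_eq_right (hw3 w hw)),
        List.map_congr_left (fun w hw => min_eq_left (le_of_lt (hw4 w hw)))]
      rw [PySem.List.sum_map_const_int, hw2, List.length_drop]
      have : ((xs.length - j' : Nat) : Int) = (xs.length : Int) - (j' : Int) := by
        omega
      rw [this]
      simp only [List.map_id']
      ring
    simp only [List.foldl_cons, List.map_cons, List.sum_cons]
    rw [ih hys.2 j' s' (t + (s' + v * ((xs.length : Int) - (j' : Int)))) hw1 hw2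
      (fun v'' hv'' w hw => le_trans (hw3 w hw) (hys.1 v'' hv''))]
    rw [hterm]; ring

-- B's value is the closed-form double sum over the ORIGINAL lists
lemma pvB_value (ys xs : List Int) :
    boardCutting_alt ys xs
      = PySem.Int.mod ((ys.sum + xs.sum)
          + (ys.map (fun v => (xs.map (fun w => min v w)).sum)).sum) (10 ^ 9 + 7) := by
  unfold boardCutting_alt
  dsimp only
  have hx : (PySem.List.sorted xs (fun x => x) false).Pairwise (· ≤ ·) := by
    simpa using PySem.List.sorted_pairwise xs (fun x => x)
  have hy : (PySem.List.sorted ys (fun x => x) false).Pairwise (· ≤ ·) := by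
    simpa using PySem.List.sorted_pairwise ys (fun x => x)
  rw [pvFoldB _ hx _ hy 0 0 (ys.sum + xs.sum) (by omega) (by simp) (by simp)]
  congr 1
  congr 1
  have hstep : ∀ v : Int,
      ((PySem.List.sorted xs (fun x => x) false).map (fun w => min v w)).sum
        = (xs.map (fun w => min v w)).sum :=
    fun v => ((PySem.List.sorted_perm xs (fun x => x) false).map (fun w => min v w)).sum_eq
  calc ((PySem.List.sorted ys (fun x => x) false).map
          (fun v => ((PySem.List.sorted xs (fun x => x) false).map (fun w => min v w)).sum)).sum
      = ((PySem.List.sorted ys (fun x => x) false).map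
          (fun v => (xs.map (fun w => min v w)).sum)).sum := by
        rw [List.map_congr_left (fun v _ => hstep v)]
    _ = (ys.map (fun v => (xs.map (fun w => min v w)).sum)).sum :=
        ((PySem.List.sorted_perm ys (fun x => x) false).map _).sum_eq

-- A's first loop builds lst = cost_y and flag = [False]*len(cost_y) ++ [True]*m
lemma pvLoop1 (ys : List Int) (m : Nat) :
    (PySem.List.pyRange 0 (ys.length : Int) 1).foldl
      (fun (st : List Int × List Bool) i =>
        (st.1 ++ [PySem.List.pyGetD ys i 0], PySem.List.pySetD st.2 i false))
      ([], List.replicate (ys.length + m) true)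
    = (ys, List.replicate ys.length false ++ List.replicate m true) := by
  suffices h : ∀ n : Nat, n ≤ ys.length →
      (PySem.List.pyRange 0 (n : Int) 1).foldl
        (fun (st : List Int × List Bool) i =>
          (st.1 ++ [PySem.List.pyGetD ys i 0], PySem.List.pySetD st.2 i false))
        ([], List.replicate (ys.length + m) true)
      = (ys.take n, List.replicate n false ++ List.replicate (ys.length + m - n) true) by
    have := h ys.length le_rfl
    simpa using this
  intro n hn
  induction n with
  | zero => simp
  | succ n ih =>
    have hn' : n ≤ ys.length := Nat.le_of_succ_le hn
    have hlt : n < ys.length := hn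
    have hsplit : PySem.List.pyRange 0 ((n + 1 : Nat) : Int) 1
        = PySem.List.pyRange 0 (n : Int) 1 ++ [(n : Int)] := by
      push_cast
      exact PySem.List.pyRange_one_succ_right (a := 0) (b := (n : Int)) (by positivity)
    rw [hsplit, List.foldl_append, ih hn']
    simp only [List.foldl_cons, List.foldl_nil, Prod.mk.injEq]
    refine ⟨?_, ?_⟩
    · rw [PySem.List.pyGetD_natCast, List.getD_eq_getElem ys 0 hlt,
        List.take_add_one, List.getElem?_eq_getElem hlt]
      simp
    · rw [PySem.List.pySetD_natCast]
      have hrep : ys.length + m - n = (ys.length + m - (n + 1)) + 1 := by omega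
      rw [hrep, List.replicate_succ, List.set_append_right _ _ (by simp)]
      simp [List.replicate_succ', List.append_assoc]

-- A's second loop appends cost_x
lemma pvLoop2 (xs init : List Int) :
    (PySem.List.pyRange 0 (xs.length : Int) 1).foldl
      (fun (l : List Int) i => l ++ [PySem.List.pyGetD xs i 0]) init = init ++ xs := by
  rw [PySem.List.foldl_pyRange_zero_pyGetD' xs 0 (fun acc e => acc ++ [e]) init,
    PySem.List.foldl_append_singleton]

-- reading (lst[k], flag[k]) over range(len(lst)) is zipping
lemma pvMap_pair_range (lst : List Int) (flag : List Bool) (hlen : lst.length ≤ flag.length) :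
    (PySem.List.pyRange 0 (lst.length : Int) 1).map
      (fun k => (PySem.List.pyGetD lst k 0, PySem.List.pyGetD flag k true))
    = lst.zip flag := by
  rw [PySem.List.pyRange_zero_natCast, List.map_map]
  apply List.ext_getElem
  · simp [Nat.min_eq_left hlen]
  · intro k h1 h2
    have hk : k < lst.length := by simpa using h1
    have hk2 : k < flag.length := lt_of_lt_of_le hk hlen
    simp [PySem.List.pyGetD_natCast, List.getElem?_eq_getElem hk,
      List.getElem?_eq_getElem hk2]

lemma pvZip_tag (ys xs : List Int) :
    (ys ++ xs).zip (List.replicate ys.length false ++ List.replicate xs.length true)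
    = pvTag ys xs := by
  rw [List.zip_append (by simp)]
  unfold pvTag
  congr 1 <;> [skip; skip] <;>
  · induction ys with
    | nil => induction xs with
      | nil => rfl
      | cons w xs ihx => simp_all [List.replicate_succ]
    | cons v ys ihy => simp_all [List.replicate_succ]

-- A's final loop is pvTot over the pairs read at the visited keys
lemma pvFoldA (lst : List Int) (flag : List Bool) :
    ∀ (keys : List Int) (t r c : Int),
      (keys.foldl
        (fun (acc : Int × Int × Int) key =>
          if !(PySem.List.pyGetD flag key true) then
            (acc.1 + PySem.List.pyGetD lst key 0 * acc.2.2, acc.2.1 + 1, acc.2.2)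
          else
            (acc.1 + PySem.List.pyGetD lst key 0 * acc.2.1, acc.2.1, acc.2.2 + 1))
        (t, r, c)).1
      = t + pvTot (keys.map
          (fun k => (PySem.List.pyGetD lst k 0, PySem.List.pyGetD flag k true))) r c := by
  intro keys
  induction keys with
  | nil => intro t r c; simp [pvTot]
  | cons k keys ih =>
    intro t r c
    cases hb : PySem.List.pyGetD flag k true <;>
      simp only [List.foldl_cons, List.map_cons, hb, Bool.not_false, Bool.not_true,
        if_pos, if_neg, Bool.false_eq_true, not_false_iff, pvTot, ih] <;> ring

-- ===== VERDICT (by name: the statement is the Claim_ definition above) =====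
theorem boardCutting_spec : Claim_equal_boardCutting := by
  intro ys xs _
  unfold Spec_boardCutting boardCutting
  simp only []
  rw [show xs.length + ys.length = ys.length + xs.length from Nat.add_comm _ _] at *
  rw [pvLoop1 ys xs.length, pvLoop2, pvFoldA, pvB_value]
  congr 1
  have hlen : (ys ++ xs).length ≤ (List.replicate ys.length false ++ List.replicate xs.length true).length := by simp
  set lst := ys ++ xs with hlst
  set flag := List.replicate ys.length false ++ List.replicate xs.length true with hflag
  set f := fun k => (PySem.List.pyGetD lst k 0, PySem.List.pyGetD flag k true) with hf
  set keys := PySem.List.pyRange 0 (lst.length : Int) 1 with hkeys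
  set S := (PySem.List.sorted keys (fun k => PySem.List.pyGetD lst k 0) true).map f with hS
  have hperm : S.Perm (pvTag ys xs) := by
    have h1 : (PySem.List.sorted keys (fun k => PySem.List.pyGetD lst k 0) true).Perm keys :=
      PySem.List.sorted_perm _ _ _
    have h2 := h1.map f
    rw [hS]
    refine h2.trans ?_
    rw [hkeys, hf, pvMap_pair_range lst flag hlen, hlst, hflag, pvZip_tag]
  have hpw : S.Pairwise (fun a b => b.1 ≤ a.1) := by
    rw [hS]
    exact List.Pairwise.map f (fun a b h => h)
      (PySem.List.sorted_pairwise_rev keys (fun k => PySem.List.pyGetD lst k 0))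
  rw [pvTot_eq S hpw 1 1, pvSum_perm true hperm, pvSum_perm false hperm, pvCross_perm hperm,
    pvSum_true_tag, pvSum_false_tag, pvCross_tag]
  ring
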